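-- pv_equiv track=rewrite | github.com/lschachter/AdventOfCode | Day_06/findLargestFiniteArea.py | sumAreas
-- ===== SOURCE A (Python) =====
-- def sumAreas(grid, locations):
-- 	areas = {locName: 1 for locName in locations}
-- 	for y in range(len(grid)):
-- 		for x in range(len(grid[0])):
-- 			countDists, minDist, minLoc = comparePoints(locations, x, y)
-- 			if countDists == 2:
-- 				grid[y][x] = '.'
-- 			elif locations[minLoc] != (x,y):
-- 				areas[minLoc] += 1
-- 				grid[y][x] = minLoc
-- 	return areas
--
-- def comparePoints(locations, x, y):
-- 	minDist = float('inf')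
-- 	minLoc = None
-- 	countDists = 0
-- 	for loc in locations:
-- 		dist = manhattanDist((x,y), locations[loc])
-- 		if dist < minDist:
-- 			minDist = dist
-- 			minLoc = loc
-- 			countDists = 1
-- 		elif dist == minDist:
-- 			countDists = 2
--
-- 	return countDists, minDist, minLoc
--
-- def manhattanDist(p1, p2):
-- 	return abs(p1[0] - p2[0]) + abs(p1[1] - p2[1])
-- ===== SOURCE B (Python) =====
-- def countDominated(items, i, px, py, height, width):
--     others = [p for j, (_, p) in enumerate(items) if j != i]
--     count = 0
--     for y in range(height):
--         for x in range(width):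
--             d = abs(x - px) + abs(y - py)
--             if (x, y) != (px, py) and all(d < abs(x - qx) + abs(y - qy) for (qx, qy) in others):
--                 count += 1
--     return count
--
-- def sumAreas(grid, locations):
--     height = len(grid)
--     width = len(grid[0]) if grid else 0
--     items = list(locations.items())
--     return {name: 1 + countDominated(items, i, px, py, height, width)
--             for i, (name, (px, py)) in enumerate(items)}
-- ===== Notes on version B (the rewrite author's own statement) =====
-- stated objective: alternative
-- what changed: B transposes the traversal: instead of A's per-cell nearest-location search (running min / tie-flag fold over the dict with a winner tally), B sweeps the grid once per location, counting the cells that location strictly dominates (strictly closer than every other location), so there is no per-cell argmin, no tie counter and no incremental areas dict; it also never mutates the grid, whereas A writes markers into it; the trade is an extra factor of the location count in the worst case.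
-- outside the precondition, e.g. on sumAreas([['a'], []], {'A': (0, 1)}): A returns {'A': 2}, B returns {'A': 2}
import Mathlib
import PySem

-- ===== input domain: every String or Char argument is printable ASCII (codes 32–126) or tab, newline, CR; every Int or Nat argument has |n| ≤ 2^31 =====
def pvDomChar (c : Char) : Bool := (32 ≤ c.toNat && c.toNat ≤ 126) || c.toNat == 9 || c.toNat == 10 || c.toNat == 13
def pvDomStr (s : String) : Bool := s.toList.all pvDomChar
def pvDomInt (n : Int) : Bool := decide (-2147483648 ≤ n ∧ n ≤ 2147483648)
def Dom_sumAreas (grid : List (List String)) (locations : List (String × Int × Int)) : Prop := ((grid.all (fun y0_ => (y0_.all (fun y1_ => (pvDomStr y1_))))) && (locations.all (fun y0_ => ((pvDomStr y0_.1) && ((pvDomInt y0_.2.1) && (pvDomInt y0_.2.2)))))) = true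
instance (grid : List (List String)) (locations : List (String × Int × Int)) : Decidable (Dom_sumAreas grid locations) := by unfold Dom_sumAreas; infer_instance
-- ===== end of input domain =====

-- B transposes the traversal: A scans the grid once, finding each cell's nearest location (running
-- min / tie flag) and incrementing a winner tally; B instead sweeps the grid once per location,
-- counting the cells that location STRICTLY dominates (strictly closer than every other location) —
-- no per-cell argmin, tie counter or incremental areas dict (objective: alternative; B is NOT
-- faster: it trades an extra factor of the location count in the worst case).  A mutates its `grid` argument in place; B does not touch it — the equivalence proved here
-- is about the RETURN value only.

-- ===== PORT A =====
-- helper: manhattanDist(p1, p2)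
def pvManhattan (p1 p2 : Int × Int) : Int := |p1.1 - p2.1| + |p1.2 - p2.2|

-- helper: the body of comparePoints' `for loc in locations` loop (state = countDists, minDist, minLoc;
-- none plays float('inf') / None)
def pvCompareStep (d : PySem.Dict String (Int × Int)) (x y : Int)
    (st : Int × Option Int × Option String) (loc : String) : Int × Option Int × Option String :=
  let dist := pvManhattan (x, y) ((d.get? loc).getD (0, 0))
  match st.2.1 with
  | none => (1, some dist, some loc)
  | some m =>
    if dist < m then (1, some dist, some loc)
    else if dist = m then (2, st.2.1, st.2.2)
    else st

-- helper: comparePoints(locations, x, y)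
def pvComparePoints (d : PySem.Dict String (Int × Int)) (x y : Int) :
    Int × Option Int × Option String :=
  d.keys.foldl (pvCompareStep d x y) (0, none, none)

-- A writes into grid[y][x]; those writes are never read back (only len(grid) / len(grid[0]) are),
-- so the port carries the areas dict only.
def sumAreas (grid : List (List String)) (locations : List (String × Int × Int)) : List (String × Int) :=
  let d : PySem.Dict String (Int × Int) :=
    PySem.Dict.ofList (locations.map (fun t => (t.1, (t.2.1, t.2.2))))
  let areas0 : PySem.Dict String Int := d.keys.foldl (fun a k => a.insert k 1) PySem.Dict.empty
  let final := (PySem.List.pyRange 0 (grid.length : Int) 1).foldl (fun areas y =>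
    (PySem.List.pyRange 0 ((grid.headD []).length : Int) 1).foldl (fun areas x =>
      let st := pvComparePoints d x y
      if st.1 = 2 then areas
      else
        match st.2.2 with
        | none => areas   -- Python raises KeyError here (empty dict); excluded by Pre_
        | some loc =>
          if (d.get? loc).getD (0, 0) ≠ (x, y) then areas.modify loc 0 (· + 1) else areas)
      areas) areas0
  final.items

-- ===== PORT B =====
-- helper: countDominated(items, i, px, py, height, width)
def pvCountDominated (items : List (String × Int × Int)) (i px py height width : Int) : Int :=
  let others := (PySem.List.enumerate items).filterMap
    (fun ju => if ju.1 ≠ i then some ju.2.2 else none)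
  (PySem.List.pyRange 0 height 1).foldl (fun count y =>
    (PySem.List.pyRange 0 width 1).foldl (fun count x =>
      let dd := |x - px| + |y - py|
      if (x, y) ≠ (px, py) ∧ others.all (fun q => decide (dd < |x - q.1| + |y - q.2|)) = true
      then count + 1 else count) count) 0

def sumAreas_alt (grid : List (List String)) (locations : List (String × Int × Int)) : List (String × Int) :=
  let height : Int := grid.length
  let width : Int := if grid.isEmpty then 0 else ((grid.headD []).length : Int)
  let d : PySem.Dict String (Int × Int) :=
    PySem.Dict.ofList (locations.map (fun t => (t.1, (t.2.1, t.2.2))))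
  let items := d.items
  ((PySem.List.enumerate items).foldl (fun res it =>
      res.insert it.2.1 (1 + pvCountDominated items it.1 it.2.2.1 it.2.2.2 height width))
    PySem.Dict.empty).items

-- ===== PRECONDITION & SPEC =====
-- Pre_ excludes (a) grids with a row shorter than the first row, on which A's in-place writes
-- grid[y][x] (x < len(grid[0])) raise IndexError in all but degenerate cases (the rare ragged grids
-- where every short-row cell happens to be its unique nearest location's own position, so A never
-- writes there and still returns, are conservatively excluded too), and (b) grids with cells but an
-- empty locations dict, on which A raises KeyError (locations[None]).
def Pre_sumAreas (grid : List (List String)) (locations : List (String × Int × Int)) : Prop :=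
  (∀ row ∈ grid, (grid.headD []).length ≤ row.length) ∧
  (grid = [] ∨ grid.headD [] = [] ∨ locations ≠ [])
instance (grid : List (List String)) (locations : List (String × Int × Int)) : Decidable (Pre_sumAreas grid locations) := by unfold Pre_sumAreas; infer_instance

def pvWitness_sumAreas : List (List String) × (List (String × Int × Int)) :=
  ([["a", "b"], ["c", "d"]], [("A", (0, 0)), ("B", (1, 1))])

def Spec_sumAreas (grid : List (List String)) (locations : List (String × Int × Int)) (out : List (String × Int)) : Prop := out = sumAreas_alt grid locations
instance (grid : List (List String)) (locations : List (String × Int × Int)) (out : List (String × Int)) : Decidable (Spec_sumAreas grid locations out) := by unfold Spec_sumAreas; infer_instance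

-- ===== CLAIM (what is proved, stated in full; the proofs are below) =====
def Claim_equal_sumAreas : Prop := ∀ (grid : List (List String)) (locations : List (String × Int × Int)), Dom_sumAreas grid locations → Pre_sumAreas grid locations → Spec_sumAreas grid locations (sumAreas grid locations)

-- ===== LEMMAS AND PROOFS =====

-- the per-item step of comparePoints once the dict lookup has been resolved to the item's own value
def pvStep (x y : Int) (st : Int × Option Int × Option String) (t : String × Int × Int) :
    Int × Option Int × Option String :=
  let dist := |x - t.2.1| + |y - t.2.2|
  match st.2.1 with
  | none => (1, some dist, some t.1)
  | some m =>
    if dist < m then (1, some dist, some t.1)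
    else if dist = m then (2, st.2.1, st.2.2)
    else st

def pvDists (x y : Int) (pts : List (String × Int × Int)) : List Int :=
  pts.map (fun t => |x - t.2.1| + |y - t.2.2|)

-- the name A's cell update increments (if any): unique nearest location, not the cell itself
def pvWinName (pts : List (String × Int × Int)) (x y : Int) : Option String :=
  match PySem.List.min? (pvDists x y pts) (fun v => v) with
  | none => none
  | some m =>
    if (pvDists x y pts).count m = 1 then
      match PySem.List.index? (pvDists x y pts) m with
      | none => none
      | some i =>
        if (pts.getD i ("", (0, 0))).2 ≠ (x, y) then some (pts.getD i ("", (0, 0))).1 else none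
    else none

-- the abstract per-cell tally update both sides are reduced to
def pvUpd (pts : List (String × Int × Int)) (y : Int) (w : PySem.Dict String Int) (x : Int) :
    PySem.Dict String Int :=
  match pvWinName pts x y with
  | some nm => w.modify nm 0 (· + 1)
  | none => w

theorem pvComparePoints_eq_items (d : PySem.Dict String (Int × Int)) (x y : Int)
    (hnd : d.keys.Nodup) :
    pvComparePoints d x y = d.items.foldl (pvStep x y) (0, none, none) := by
  unfold pvComparePoints
  have hkeys : d.keys = d.items.map Prod.fst := by simp [PySem.Dict.keys]
  rw [hkeys, List.foldl_map]
  refine PySem.List.foldl_congr_mem _ _ _ _ ?_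
  intro acc t ht
  have hmem : (t.1, t.2) ∈ d.items := by simpa using ht
  have hget : d.get? t.1 = some t.2 := PySem.Dict.get?_of_mem_items d hmem hnd
  simp [pvCompareStep, pvStep, pvManhattan, hget]

theorem pvMin?_append_some (D : List Int) (v m : Int)
    (h : PySem.List.min? D (fun z => z) = some m) :
    PySem.List.min? (D ++ [v]) (fun z => z) = if v < m then some v else some m := by
  simp only [PySem.List.min?] at h ⊢
  rw [List.foldl_append, h]
  rfl

-- characterisation of comparePoints' fold: min value, its first index, tie flag from the count
theorem pvChar (x y : Int) (pts : List (String × Int × Int)) : pts ≠ [] →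
    ∃ m k, PySem.List.min? (pvDists x y pts) (fun v => v) = some m ∧
      PySem.List.index? (pvDists x y pts) m = some k ∧
      ∃ hk : k < pts.length,
        pts.foldl (pvStep x y) (0, none, none) =
          ((if (pvDists x y pts).count m = 1 then 1 else 2), some m, some pts[k].1) := by
  induction pts using List.reverseRecOn with
  | nil => intro h; exact absurd rfl h
  | append_singleton l t ih =>
    intro _
    rcases eq_or_ne l [] with hl | hl
    · subst hl
      refine ⟨|x - t.2.1| + |y - t.2.2|, 0, ?_, ?_, by simp, ?_⟩
      · simp [pvDists, PySem.List.min?]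
      · simpa [pvDists] using
          PySem.List.index?_cons_self (x := |x - t.2.1| + |y - t.2.2|) (xs := ([] : List Int))
      · simp [pvDists, pvStep]
    · obtain ⟨m, k, hmin, hidx, hk, hfold⟩ := ih hl
      have hD : pvDists x y (l ++ [t]) = pvDists x y l ++ [|x - t.2.1| + |y - t.2.2|] := by
        simp [pvDists]
      have hmem : m ∈ pvDists x y l := PySem.List.min?_mem hmin
      have hle : ∀ z ∈ pvDists x y l, m ≤ z := fun z hz => PySem.List.min?_isMin hmin z hz
      have hfold' : (l ++ [t]).foldl (pvStep x y) (0, none, none)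
          = pvStep x y (l.foldl (pvStep x y) (0, none, none)) t := by
        simp [List.foldl_append]
      have hk' : k < (l ++ [t]).length := by rw [List.length_append]; simp; omega
      have hget : (l ++ [t])[k]'hk' = l[k]'hk := List.getElem_append_left hk
      rcases lt_trichotomy (|x - t.2.1| + |y - t.2.2|) m with hvm | hvm | hvm
      · -- new strict minimum
        have hnot : |x - t.2.1| + |y - t.2.2| ∉ pvDists x y l :=
          fun hvmem => absurd (hle _ hvmem) (not_le.mpr hvm)
        have hlen : l.length < (l ++ [t]).length := by simp
        refine ⟨|x - t.2.1| + |y - t.2.2|, l.length, ?_, ?_, hlen, ?_⟩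
        · rw [hD, pvMin?_append_some _ _ _ hmin]; simp [hvm]
        · rw [hD]
          have h2 := PySem.List.index?_append_singleton_self (pvDists x y l) _ hnot
          simpa [pvDists] using h2
        · have hcnt :
              (pvDists x y l ++ [|x - t.2.1| + |y - t.2.2|]).count (|x - t.2.1| + |y - t.2.2|)
                = 1 := by
            simp [List.count_append, List.count_eq_zero.mpr hnot]
          rw [hfold', hfold, hD]
          simp [pvStep, hvm, hcnt]
      · -- equal to the running minimum: tie
        have hcnt : ¬ (pvDists x y l ++ [|x - t.2.1| + |y - t.2.2|]).count m = 1 := by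
          have h1 : 0 < (pvDists x y l).count m := List.count_pos_iff.mpr hmem
          rw [hvm, List.count_append]
          have h2 : List.count m [m] = 1 := by simp
          omega
        refine ⟨m, k, ?_, ?_, hk', ?_⟩
        · rw [hD, pvMin?_append_some _ _ _ hmin, hvm]; simp
        · rw [hD, PySem.List.index?_append_of_mem _ hmem, hidx]
        · rw [hfold', hfold, hD]
          simp [pvStep, hvm, hget]
          simp [List.count_eq_zero]
          exact hmem
      · -- larger than the minimum: state unchanged
        have hvne : |x - t.2.1| + |y - t.2.2| ≠ m := ne_of_gt hvm
        have hnlt : ¬ |x - t.2.1| + |y - t.2.2| < m := not_lt.mpr (le_of_lt hvm)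
        have hcnt : (pvDists x y l ++ [|x - t.2.1| + |y - t.2.2|]).count m
            = (pvDists x y l).count m := by
          simp [List.count_append, hvne]
        refine ⟨m, k, ?_, ?_, hk', ?_⟩
        · rw [hD, pvMin?_append_some _ _ _ hmin]; simp [hnlt]
        · rw [hD, PySem.List.index?_append_of_mem _ hmem, hidx]
        · rw [hfold', hfold, hD]
          simp [pvStep, hnlt, hvne, hcnt, hget]

-- the relation maintained between A's areas dict and the abstract wins tally
def pvInv (d : PySem.Dict String (Int × Int)) (areas wins : PySem.Dict String Int) : Prop :=
  areas.keys = d.keys ∧ ∀ s ∈ d.keys, areas.getD s 0 = 1 + wins.getD s 0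

theorem pvFoldl_rel {σ τ α : Type} (R : σ → τ → Prop) (f : σ → α → σ) (g : τ → α → τ)
    (h : ∀ s t a, R s t → R (f s a) (g t a)) :
    ∀ (l : List α) (s : σ) (t : τ), R s t → R (l.foldl f s) (l.foldl g t) := by
  intro l
  induction l with
  | nil => intro s t hr; exact hr
  | cons a l ih => intro s t hr; exact ih _ _ (h s t a hr)

theorem pvInv_modify (d : PySem.Dict String (Int × Int)) (areas wins : PySem.Dict String Int)
    (loc : String) (hloc : loc ∈ d.keys) (h : pvInv d areas wins) :
    pvInv d (areas.modify loc 0 (· + 1)) (wins.modify loc 0 (· + 1)) := by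
  obtain ⟨hkeys, hval⟩ := h
  have hcont : areas.contains loc = true :=
    (PySem.Dict.contains_iff_mem_keys areas loc).mpr (hkeys ▸ hloc)
  constructor
  · rw [PySem.Dict.keys_modify, PySem.Dict.keys_insert_of_contains _ _ hcont]
    exact hkeys
  · intro s hs
    rw [PySem.Dict.getD_modify, PySem.Dict.getD_modify]
    by_cases hsl : s = loc
    · have hvl := hval loc hloc
      rw [hsl, if_pos rfl, if_pos rfl, hvl]
      ring
    · simp only [if_neg hsl]
      exact hval s hs

theorem pvCell_preserves (d : PySem.Dict String (Int × Int)) (hnd : d.keys.Nodup)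
    (x y : Int) (areas wins : PySem.Dict String Int) (h : pvInv d areas wins) :
    pvInv d
      (if (pvComparePoints d x y).1 = 2 then areas
       else
         match (pvComparePoints d x y).2.2 with
         | none => areas
         | some loc =>
           if (d.get? loc).getD (0, 0) ≠ (x, y) then areas.modify loc 0 (· + 1) else areas)
      (pvUpd d.items y wins x) := by
  rw [pvComparePoints_eq_items d x y hnd]
  rcases eq_or_ne d.items [] with hp | hp
  · rw [hp]
    simp [pvUpd, pvWinName, pvDists, PySem.List.min?]
    exact h
  · obtain ⟨m, k, hmin, hidx, hk, hfold⟩ := pvChar x y d.items hp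
    simp only [pvUpd, pvWinName, hfold, hmin, hidx]
    have hkmem : (d.items[k].1, d.items[k].2) ∈ d.items := by
      simpa using List.getElem_mem hk
    have hget : d.get? d.items[k].1 = some d.items[k].2 :=
      PySem.Dict.get?_of_mem_items d hkmem hnd
    have hgetD : d.items.getD k ("", (0, 0)) = d.items[k] := List.getD_eq_getElem _ _ hk
    have hkey : d.items[k].1 ∈ d.keys := by
      have : d.items[k] ∈ d.items := List.getElem_mem hk
      simp only [PySem.Dict.keys]
      exact List.mem_map_of_mem this
    by_cases hc : (pvDists x y d.items).count m = 1
    · simp only [if_pos hc, hgetD, hget]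
      by_cases hxy : d.items[k].2 = (x, y)
      · simp [hxy]
        exact h
      · simp [hxy]
        exact pvInv_modify d areas wins d.items[k].1 hkey h
    · simp only [if_neg hc]
      simpa using h

theorem pvInv_init (d : PySem.Dict String (Int × Int)) (hnd : d.keys.Nodup) :
    pvInv d (d.keys.foldl (fun a k => a.insert k 1) PySem.Dict.empty) PySem.Dict.empty := by
  have hfresh : ∀ a ∈ d.keys,
      (PySem.Dict.empty : PySem.Dict String Int).contains ((fun a => a) a) = false := by
    intro a _
    rfl
  have hnd' : (d.keys.map (fun a => a)).Nodup := by simpa using hnd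
  have hitems :=
    PySem.Dict.items_foldl_insert_fresh d.keys (fun a => a) (fun _ => (1 : Int))
      PySem.Dict.empty hfresh hnd'
  have hitems' : (d.keys.foldl (fun a k => a.insert k (1 : Int))
        (PySem.Dict.empty : PySem.Dict String Int)).items
      = d.keys.map (fun a => (a, (1 : Int))) := by
    simpa using hitems
  have hkeys : (d.keys.foldl (fun a k => a.insert k (1 : Int))
      (PySem.Dict.empty : PySem.Dict String Int)).keys = d.keys := by
    rw [PySem.Dict.keys_foldl_insert, PySem.Dict.keys_empty, PySem.Set.update_nil_left]
    exact PySem.Set.ofList_eq_self_of_nodup _ hnd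
  constructor
  · exact hkeys
  · intro s hs
    have hmem : (s, (1 : Int)) ∈ (d.keys.foldl (fun a k => a.insert k (1 : Int))
        (PySem.Dict.empty : PySem.Dict String Int)).items := by
      rw [hitems']
      exact List.mem_map_of_mem hs
    rw [PySem.Dict.getD_of_mem_items _ hmem (by rw [hkeys]; exact hnd)]
    rfl

-- A's nested fold, reduced to `1 + tally` where the tally is the abstract pvUpd fold
theorem pvNested (d : PySem.Dict String (Int × Int)) (hnd : d.keys.Nodup) (ys xs : List Int) :
    (ys.foldl (fun areas y =>
        xs.foldl (fun areas x =>
          if (pvComparePoints d x y).1 = 2 then areas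
          else
            match (pvComparePoints d x y).2.2 with
            | none => areas
            | some loc =>
              if (d.get? loc).getD (0, 0) ≠ (x, y) then areas.modify loc 0 (· + 1) else areas)
          areas)
      (d.keys.foldl (fun a k => a.insert k (1 : Int))
        (PySem.Dict.empty : PySem.Dict String Int))).items
    = d.keys.map (fun name => (name, 1 +
        (ys.foldl (fun w y => xs.foldl (pvUpd d.items y) w)
          (PySem.Dict.empty : PySem.Dict String Int)).getD name 0)) := by
  have hInv := pvFoldl_rel (pvInv d) _ _
    (fun s t a hr => pvFoldl_rel (pvInv d) _ _
      (fun s' t' a' hr' => pvCell_preserves d hnd a' a s' t' hr') xs s t hr)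
    ys _ _ (pvInv_init d hnd)
  obtain ⟨hkeys, hval⟩ := hInv
  rw [PySem.Dict.items_eq_map_keys _ (by rw [hkeys]; exact hnd) 0, hkeys]
  exact List.map_congr_left (fun s hs => by rw [hval s hs])

-- getD of the pvUpd tally is the count of cells whose winner is that name (one row)
theorem pvGetD_row (pts : List (String × Int × Int)) (y : Int) (s : String) :
    ∀ (xs : List Int) (w : PySem.Dict String Int),
      (xs.foldl (pvUpd pts y) w).getD s 0
        = xs.foldl (fun c x => if pvWinName pts x y = some s then c + 1 else c) (w.getD s 0) := by
  intro xs
  induction xs with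
  | nil => intro w; rfl
  | cons x xs ih =>
    intro w
    rw [List.foldl_cons, List.foldl_cons, ih]
    congr 1
    cases hwin : pvWinName pts x y with
    | none => simp [pvUpd, hwin]
    | some nm =>
      simp only [pvUpd, hwin, PySem.Dict.getD_modify]
      by_cases hsn : s = nm
      · subst hsn; simp
      · simp [hsn, eq_comm]

-- …and over the whole grid
theorem pvGetD_grid (pts : List (String × Int × Int)) (s : String) (ys xs : List Int) :
    ∀ (w : PySem.Dict String Int),
      (ys.foldl (fun w y => xs.foldl (pvUpd pts y) w) w).getD s 0
        = ys.foldl (fun c y =>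
            xs.foldl (fun c x => if pvWinName pts x y = some s then c + 1 else c) c)
            (w.getD s 0) := by
  induction ys with
  | nil => intro w; rfl
  | cons y ys ih =>
    intro w
    rw [List.foldl_cons, List.foldl_cons, ih, pvGetD_row]

-- a list element's count is 1 exactly when no OTHER index carries the same value
theorem pvCount_eq_one_iff (D : List Int) (m : Int) (k : Nat) (hk : k < D.length)
    (hkm : D[k] = m) :
    D.count m = 1 ↔ ∀ j (hj : j < D.length), j ≠ k → D[j] ≠ m := by
  have hsplit : D.take k ++ D[k] :: D.drop (k + 1) = D := by
    rw [List.getElem_cons_drop, List.take_append_drop]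
  have hlenA : (D.take k).length = k := by simp; omega
  have hcount : D.count m = (D.take k).count m + ((D.drop (k + 1)).count m + 1) := by
    conv_lhs => rw [← hsplit]
    rw [List.count_append, List.count_cons]
    simp [hkm]
  constructor
  · intro h1 j hj hjk hDj
    have hmem : m ∈ D.take k ∨ m ∈ D.drop (k + 1) := by
      rcases Nat.lt_or_ge j k with hlt | hge
      · left
        have hj' : j < (D.take k).length := by omega
        have : (D.take k)[j]'hj' = D[j] := List.getElem_take
        rw [← hDj, ← this]
        exact List.getElem_mem hj'
      · right
        have hgt : k < j := by omega
        have hj' : j - (k + 1) < (D.drop (k + 1)).length := by simp; omega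
        have : (D.drop (k + 1))[j - (k + 1)]'hj' = D[j] := by
          rw [List.getElem_drop]
          congr 1
          omega
        rw [← hDj, ← this]
        exact List.getElem_mem hj'
    rcases hmem with h | h
    · have := List.count_pos_iff.mpr h
      omega
    · have := List.count_pos_iff.mpr h
      omega
  · intro h2
    have hA : (D.take k).count m = 0 := by
      rw [List.count_eq_zero]
      intro hmem
      obtain ⟨j, hj, hEq⟩ := List.mem_iff_getElem.mp hmem
      have hjk : j < k := by omega
      exact h2 j (by omega) (by omega) (by rw [← List.getElem_take (h := hj)]; exact hEq)
    have hB : (D.drop (k + 1)).count m = 0 := by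
      rw [List.count_eq_zero]
      intro hmem
      obtain ⟨j, hj, hEq⟩ := List.mem_iff_getElem.mp hmem
      have hjlen : (D.drop (k + 1)).length = D.length - (k + 1) := by simp
      refine h2 (k + 1 + j) (by omega) (by omega) ?_
      rw [← List.getElem_drop (h := by omega)]
      exact hEq
    omega

-- the winner is name i exactly when location i strictly dominates the cell and is not the cell
theorem pvWinName_eq_some_iff (pts : List (String × Int × Int))
    (hnd : (pts.map (fun t => t.1)).Nodup) (i : Nat) (hi : i < pts.length) (x y : Int) :
    pvWinName pts x y = some pts[i].1 ↔
      ((x, y) ≠ pts[i].2 ∧ ∀ j (hj : j < pts.length), j ≠ i →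
        |x - pts[i].2.1| + |y - pts[i].2.2| < |x - pts[j].2.1| + |y - pts[j].2.2|) := by
  have hlen : (pvDists x y pts).length = pts.length := by simp [pvDists]
  have hDj : ∀ j (hj : j < pts.length),
      (pvDists x y pts)[j]'(by omega) = |x - pts[j].2.1| + |y - pts[j].2.2| := by
    intro j hj
    simp [pvDists]
  have hne : pvDists x y pts ≠ [] := by
    intro h
    rw [h] at hlen
    simp at hlen
    omega
  cases hmin : PySem.List.min? (pvDists x y pts) (fun v => v) with
  | none => exact absurd (((PySem.List.min?_eq_none_iff _ _).mp hmin)) hne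
  | some m =>
    have hmle : ∀ z ∈ pvDists x y pts, m ≤ z := fun z hz => PySem.List.min?_isMin hmin z hz
    cases hidx : PySem.List.index? (pvDists x y pts) m with
    | none =>
      exact absurd (PySem.List.min?_mem hmin)
        ((PySem.List.index?_eq_none_iff _ _).mp hidx)
    | some k =>
      obtain ⟨hk, hDk, _⟩ := PySem.List.getElem_of_index?_eq_some hidx
      have hk' : k < pts.length := by omega
      have hgetD : pts.getD k ("", (0, 0)) = pts[k] := List.getD_eq_getElem _ _ hk'
      have hname : pts[k].1 = pts[i].1 ↔ k = i := by
        constructor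
        · intro h
          have h1 : (pts.map (fun t => t.1))[k]'(by simpa using hk') =
              (pts.map (fun t => t.1))[i]'(by simpa using hi) := by
            simpa using h
          exact (List.Nodup.getElem_inj_iff hnd).mp h1
        · intro h; subst h; rfl
      simp only [pvWinName, hmin, hidx]
      by_cases hc : (pvDists x y pts).count m = 1
      · rw [if_pos hc]
        simp only [hgetD]
        have huniq : ∀ j (hj : j < pts.length), j ≠ k →
            m < |x - pts[j].2.1| + |y - pts[j].2.2| := by
          intro j hj hjk
          have h1 := (pvCount_eq_one_iff _ m k hk hDk).mp hc j (by omega) hjk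
          have h2 : m ≤ (pvDists x y pts)[j]'(by omega) := hmle _ (List.getElem_mem _)
          rw [hDj j hj] at h1 h2
          omega
        constructor
        · intro hEq
          by_cases hpos : pts[k].2 ≠ (x, y)
          · rw [if_pos hpos] at hEq
            have hki : k = i := hname.mp (by simpa using hEq)
            subst hki
            refine ⟨fun h => hpos h.symm, fun j hj hjk => ?_⟩
            have := huniq j hj hjk
            rw [hDj k hk'] at hDk
            omega
          · rw [if_neg hpos] at hEq
            simp at hEq
        · rintro ⟨hpos, hstrict⟩
          have hki : k = i := by
            by_contra hki
            have h1 := hstrict k hk' hki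
            have h2 : m ≤ (pvDists x y pts)[i]'(by omega) := hmle _ (List.getElem_mem _)
            rw [hDj i hi] at h2
            rw [hDj k hk'] at hDk
            omega
          subst hki
          rw [if_pos (fun h => hpos h.symm)]
      · rw [if_neg hc]
        constructor
        · intro h; simp at h
        · rintro ⟨hpos, hstrict⟩
          have hki : k = i := by
            by_contra hki
            have h1 := hstrict k hk' hki
            have h2 : m ≤ (pvDists x y pts)[i]'(by omega) := hmle _ (List.getElem_mem _)
            rw [hDj i hi] at h2
            rw [hDj k hk'] at hDk
            omega
          subst hki
          exact absurd ((pvCount_eq_one_iff _ m k hk hDk).mpr (fun j hj hjk => by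
            have := hstrict j (by omega) hjk
            rw [hDj j (by omega)]
            rw [hDj k hk'] at hDk
            omega)) hc

-- membership in B's `others` list
theorem pvOthers_mem (pts : List (String × Int × Int)) (i : Int) (q : Int × Int) :
    q ∈ (PySem.List.enumerate pts).filterMap
        (fun ju => if ju.1 ≠ i then some ju.2.2 else none) ↔
      ∃ (j : Nat) (hj : j < pts.length), (j : Int) ≠ i ∧ q = pts[j].2 := by
  rw [List.mem_filterMap]
  constructor
  · rintro ⟨a, ha, hfa⟩
    obtain ⟨j, hj, rfl⟩ := (PySem.List.mem_enumerate_iff _ _ _).mp ha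
    by_cases hji : ((0 : Int) + j) ≠ i
    · rw [if_pos hji] at hfa
      refine ⟨j, hj, by simpa using hji, by simpa using hfa.symm⟩
    · rw [if_neg hji] at hfa
      exact absurd hfa (by simp)
  · rintro ⟨j, hj, hji, rfl⟩
    refine ⟨((j : Int), pts[j]), (PySem.List.mem_enumerate_iff _ _ _).mpr ⟨j, hj, by simp⟩, ?_⟩
    rw [if_pos (by simpa using hji)]

-- B's per-location count equals the getD of the abstract tally
theorem pvCount_eq_getD (pts : List (String × Int × Int))
    (hnd : (pts.map (fun t => t.1)).Nodup) (i : Nat) (hi : i < pts.length) (ys xs : List Int) :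
    (ys.foldl (fun c y =>
        xs.foldl (fun c x =>
          if (x, y) ≠ (pts[i].2.1, pts[i].2.2) ∧
              ((PySem.List.enumerate pts).filterMap
                (fun ju => if ju.1 ≠ (i : Int) then some ju.2.2 else none)).all
                (fun q => decide (|x - pts[i].2.1| + |y - pts[i].2.2| < |x - q.1| + |y - q.2|))
                = true
          then c + 1 else c) c) (0 : Int))
      = (ys.foldl (fun w y => xs.foldl (pvUpd pts y) w)
          (PySem.Dict.empty : PySem.Dict String Int)).getD pts[i].1 0 := by
  rw [pvGetD_grid, PySem.Dict.getD_empty]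
  refine PySem.List.foldl_congr_mem _ _ _ _ ?_
  intro c0 y _
  refine PySem.List.foldl_congr_mem _ _ _ _ ?_
  intro c x _
  refine if_congr ?_ rfl rfl
  rw [pvWinName_eq_some_iff pts hnd i hi x y]
  constructor
  · rintro ⟨h1, h2⟩
    refine ⟨by simpa using h1, fun j hj hji => ?_⟩
    have hq : pts[j].2 ∈ (PySem.List.enumerate pts).filterMap
        (fun ju => if ju.1 ≠ (i : Int) then some ju.2.2 else none) :=
      (pvOthers_mem pts (i : Int) pts[j].2).mpr ⟨j, hj, by exact_mod_cast hji, rfl⟩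
    rw [List.all_eq_true] at h2
    simpa using h2 _ hq
  · rintro ⟨h1, h2⟩
    refine ⟨by simpa using h1, ?_⟩
    rw [List.all_eq_true]
    intro q hq
    obtain ⟨j, hj, hji, rfl⟩ := (pvOthers_mem pts (i : Int) q).mp hq
    simpa using h2 j hj (by exact_mod_cast hji)

-- the whole equivalence for an arbitrary key dict and grid extents
theorem pvMain (d : PySem.Dict String (Int × Int)) (hnd : d.keys.Nodup) (height width : Int) :
    ((PySem.List.pyRange 0 height 1).foldl (fun areas y =>
        (PySem.List.pyRange 0 width 1).foldl (fun areas x =>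
          if (pvComparePoints d x y).1 = 2 then areas
          else
            match (pvComparePoints d x y).2.2 with
            | none => areas
            | some loc =>
              if (d.get? loc).getD (0, 0) ≠ (x, y) then areas.modify loc 0 (· + 1) else areas)
          areas)
      (d.keys.foldl (fun a k => a.insert k (1 : Int))
        (PySem.Dict.empty : PySem.Dict String Int))).items
    = ((PySem.List.enumerate d.items).foldl (fun res it =>
        res.insert it.2.1 (1 + pvCountDominated d.items it.1 it.2.2.1 it.2.2.2 height width))
      PySem.Dict.empty).items := by
  have hnd' : (d.items.map (fun t => t.1)).Nodup := by
    simpa [PySem.Dict.keys] using hnd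
  rw [pvNested d hnd]
  rw [PySem.Dict.items_foldl_insert_fresh (PySem.List.enumerate d.items) (fun it => it.2.1)
    (fun it => 1 + pvCountDominated d.items it.1 it.2.2.1 it.2.2.2 height width)
    PySem.Dict.empty (fun a _ => PySem.Dict.contains_empty _)
    (by rw [show (fun it : Int × (String × Int × Int) => it.2.1)
          = (fun t : String × Int × Int => t.1) ∘ (fun it : Int × (String × Int × Int) => it.2)
          from rfl, ← List.map_map, PySem.List.map_snd_enumerate]
        exact hnd')]
  rw [show (PySem.Dict.empty : PySem.Dict String Int).items = [] from rfl, List.nil_append]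
  apply List.ext_getElem
  · simp [PySem.List.length_enumerate, PySem.Dict.keys]
  · intro n h1 h2
    have hn : n < d.items.length := by
      simpa [PySem.Dict.keys] using h1
    have hkeyn : d.keys = d.items.map (fun t => t.1) := by simp [PySem.Dict.keys]
    simp only [List.getElem_map, PySem.List.getElem_enumerate, hkeyn]
    refine Prod.ext rfl ?_
    show 1 + _ = 1 + pvCountDominated d.items ((0 : Int) + (n : Int)) d.items[n].2.1 d.items[n].2.2 height width
    have hcast : ((0 : Int) + (n : Int)) = ((n : Nat) : Int) := by omega
    rw [hcast]
    simp only [pvCountDominated]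
    rw [pvCount_eq_getD d.items hnd' n hn]

-- ===== VERDICT (by name: the statement is the Claim_ definition above) =====
theorem sumAreas_spec : Claim_equal_sumAreas := by
  intro grid locations _ _
  show sumAreas grid locations = sumAreas_alt grid locations
  have hnd := PySem.Dict.nodup_keys_ofList (locations.map (fun t => (t.1, (t.2.1, t.2.2))))
  cases grid with
  | nil => exact pvMain _ hnd _ _
  | cons r rs => exact pvMain _ hnd _ _
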